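-- pv_equiv track=rewrite | github.com/Odysafe/ODYSAFE-CTI | cti-platform/modules/cti_pipeline.py | create_narrative_text
-- ===== SOURCE A (Python) =====
-- from typing import List, Dict, Optional, Any
--
-- def create_narrative_text(iocs_list: List[Dict], source_context: str = "") -> str:
--     """
--     Creates a narrative text from IOCs and context
--     This text will be used by txt2stix
--
--     Args:
--         iocs_list: List of dictionaries with 'ioc_type' and 'ioc_value'
--         source_context: Source context
--
--     Returns:
--         Formatted narrative text
--     """
--     lines = []
--
--     # Header
--     lines.append("CYBER THREAT INTELLIGENCE REPORT")
--     lines.append("")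
--
--     # Context
--     if source_context:
--         lines.append("Context:")
--         lines.append(source_context)
--         lines.append("")
--
--     # IOCs organized by type - natural format for txt2stix
--     if iocs_list:
--         lines.append("Extracted Indicators of Compromise (IOCs):")
--         lines.append("")
--
--         # Group by type
--         iocs_by_type = {}
--         for ioc in iocs_list:
--             ioc_type = ioc.get('ioc_type', 'unknown')
--             ioc_value = ioc.get('ioc_value', '')
--             if ioc_value:
--                 if ioc_type not in iocs_by_type:
--                     iocs_by_type[ioc_type] = []
--                 iocs_by_type[ioc_type].append(ioc_value)
--
--         # Add IOCs by type - simple format for automatic extraction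
--         for ioc_type, values in sorted(iocs_by_type.items()):
--             lines.append(f"{ioc_type.upper()}:")
--             for value in values:
--                 # Simple format: just the value (txt2stix will extract it automatically)
--                 lines.append(value)
--             lines.append("")
--
--     return "\n".join(lines)
-- ===== SOURCE B (Python) =====
-- def create_narrative_text(iocs_list, source_context=""):
--     lines = ["CYBER THREAT INTELLIGENCE REPORT", ""]
--     if source_context:
--         lines += ["Context:", source_context, ""]
--     if iocs_list:
--         pairs = [(ioc.get('ioc_type', 'unknown'), ioc.get('ioc_value', '')) for ioc in iocs_list]
--         pairs = [p for p in pairs if p[1]]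
--         types = sorted(dict.fromkeys(t for t, _ in pairs))
--         ioc_lines = [line for t in types
--                      for line in [t.upper() + ":"] + [v for ty, v in pairs if ty == t] + [""]]
--         lines += ["Extracted Indicators of Compromise (IOCs):", ""] + ioc_lines
--     return "\n".join(lines)
-- ===== Notes on version B (the rewrite author's own statement) =====
-- stated objective: alternative
-- what changed: Replaces A's incrementally built dict-of-lists (then sorted items) with a flat pipeline: build the filtered (type, value) pair list once, sort the deduplicated types, and emit each section by a per-type filter pass over the pairs via a flat comprehension.
import Mathlib
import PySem

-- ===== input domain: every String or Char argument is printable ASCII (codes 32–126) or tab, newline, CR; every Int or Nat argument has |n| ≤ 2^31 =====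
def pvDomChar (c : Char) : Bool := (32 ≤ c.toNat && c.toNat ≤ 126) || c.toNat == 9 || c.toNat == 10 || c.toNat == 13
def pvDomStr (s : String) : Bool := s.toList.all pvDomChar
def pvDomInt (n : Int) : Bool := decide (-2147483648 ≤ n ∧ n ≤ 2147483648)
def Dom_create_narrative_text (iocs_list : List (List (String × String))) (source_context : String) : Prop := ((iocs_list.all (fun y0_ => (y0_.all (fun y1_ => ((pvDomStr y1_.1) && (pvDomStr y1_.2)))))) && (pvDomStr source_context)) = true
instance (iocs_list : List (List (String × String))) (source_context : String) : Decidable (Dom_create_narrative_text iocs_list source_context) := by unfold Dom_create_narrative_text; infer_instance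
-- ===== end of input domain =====

-- B replaces A's dict-of-lists grouping with a filtered pair list, sorted deduped types and a per-type
-- filter pass emitting the sections via a flat comprehension (objective: alternative decomposition).


-- ===== PORT A =====
def create_narrative_text (iocs_list : List (List (String × String))) (source_context : String) : String :=
  let lines : List String := ["CYBER THREAT INTELLIGENCE REPORT", ""]
  let lines := if source_context != "" then lines ++ ["Context:", source_context, ""] else lines
  let lines :=
    if iocs_list != [] then
      let lines := lines ++ ["Extracted Indicators of Compromise (IOCs):", ""]
      -- 'if ioc_type not in d: d[ioc_type] = []; d[ioc_type].append(ioc_value)' is Dict.modify with default []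
      let iocs_by_type : PySem.Dict String (List String) :=
        iocs_list.foldl (fun d ioc =>
          let ioc_type := (PySem.Dict.mk ioc).getD "ioc_type" "unknown"
          let ioc_value := (PySem.Dict.mk ioc).getD "ioc_value" ""
          if ioc_value != "" then d.modify ioc_type [] (fun vs => vs ++ [ioc_value]) else d)
          PySem.Dict.empty
      -- sorted(d.items()): dict keys are distinct, so Python's tuple sort is exactly the (stable) sort by key
      (PySem.List.sorted iocs_by_type.items (fun p => p.1)).foldl
        (fun lines p => lines ++ [PySem.Str.upper p.1 ++ ":"] ++ p.2 ++ [""]) lines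
    else lines
  PySem.Str.join "\n" lines

-- ===== PORT B =====
def create_narrative_text_alt (iocs_list : List (List (String × String))) (source_context : String) : String :=
  let lines : List String := ["CYBER THREAT INTELLIGENCE REPORT", ""]
  let lines := if source_context != "" then lines ++ ["Context:", source_context, ""] else lines
  let lines :=
    if iocs_list != [] then
      let pairs := iocs_list.map (fun ioc =>
        ((PySem.Dict.mk ioc).getD "ioc_type" "unknown", (PySem.Dict.mk ioc).getD "ioc_value" ""))
      let pairs := pairs.filter (fun p => p.2 != "")
      -- sorted(dict.fromkeys(…)) = sort of the order-preserving dedup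
      let types := PySem.List.sorted (PySem.List.dedup (pairs.map (fun p => p.1))) (fun t => t)
      let ioc_lines := types.flatMap (fun t =>
        (PySem.Str.upper t ++ ":") :: (pairs.filter (fun p => p.1 == t)).map (fun p => p.2) ++ [""])
      lines ++ ["Extracted Indicators of Compromise (IOCs):", ""] ++ ioc_lines
    else lines
  PySem.Str.join "\n" lines

-- ===== PRECONDITION & SPEC =====
def Spec_create_narrative_text (iocs_list : List (List (String × String))) (source_context : String) (out : String) : Prop := out = create_narrative_text_alt iocs_list source_context
instance (iocs_list : List (List (String × String))) (source_context : String) (out : String) : Decidable (Spec_create_narrative_text iocs_list source_context out) := by unfold Spec_create_narrative_text; infer_instance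

-- ===== CLAIM (what is proved, stated in full; the proofs are below) =====
def Claim_equal_create_narrative_text : Prop := ∀ (iocs_list : List (List (String × String))) (source_context : String), Dom_create_narrative_text iocs_list source_context → Spec_create_narrative_text iocs_list source_context (create_narrative_text iocs_list source_context)

-- ===== LEMMAS AND PROOFS =====

-- A's grouping dict, as a function of the filtered (type, value) pair list
def pvGroup (pairs : List (String × String)) : PySem.Dict String (List String) :=
  pairs.foldl (fun d p => d.modify p.1 [] (fun vs => vs ++ [p.2])) PySem.Dict.empty

lemma pvGroup_keys (pairs : List (String × String)) :
    (pvGroup pairs).keys = PySem.Set.ofList (pairs.map (fun p => p.1)) := by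
  unfold pvGroup
  rw [PySem.Dict.keys_foldl_modify_key pairs (fun p => p.1) [] (fun _ p => fun vs => vs ++ [p.2])]
  rw [PySem.Dict.keys_empty, PySem.Set.update_nil_left]

lemma pvGroup_getD (pairs : List (String × String)) (t : String) :
    (pvGroup pairs).getD t [] = (pairs.filter (fun p => p.1 == t)).map (fun p => p.2) := by
  unfold pvGroup
  rw [PySem.Dict.getD_foldl_modify_append]
  simp [PySem.Dict.getD_empty]

lemma pvGroup_keys_nodup (pairs : List (String × String)) : (pvGroup pairs).keys.Nodup := by
  rw [pvGroup_keys]; exact PySem.Set.nodup_ofList _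

-- sorting a list of pairs with distinct first components by fst = sorting the fsts and re-attaching
lemma sorted_map_fst {ν : Type} (keys : List String) (h : keys.Nodup) (f : String → ν) :
    PySem.List.sorted (keys.map (fun k => (k, f k))) (fun p => p.1)
      = (PySem.List.sorted keys (fun t => t)).map (fun k => (k, f k)) := by
  apply PySem.List.sorted_eq_of_perm_of_pairwise_lt
  · exact (PySem.List.sorted_perm keys (fun t => t) false).map _
  · rw [List.pairwise_map]
    have hle := PySem.List.sorted_pairwise keys (fun t => t)
    have hnd : (PySem.List.sorted keys (fun t => t) false).Nodup :=
      (PySem.List.sorted_perm keys (fun t => t) false).nodup_iff.mpr h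
    exact (hle.and hnd).imp (fun hab => lt_of_le_of_ne hab.1 hab.2)

-- the grouped-and-sorted items of A are B's sorted types with their filtered value lists
lemma items_sorted_eq (pairs : List (String × String)) :
    PySem.List.sorted (pvGroup pairs).items (fun p => p.1)
      = (PySem.List.sorted (PySem.List.dedup (pairs.map (fun p => p.1))) (fun t => t)).map
          (fun t => (t, (pairs.filter (fun p => p.1 == t)).map (fun p => p.2))) := by
  have hnd := pvGroup_keys_nodup pairs
  rw [PySem.Dict.items_eq_map_keys (pvGroup pairs) hnd []]
  have : (pvGroup pairs).keys.map (fun k => (k, (pvGroup pairs).getD k []))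
      = (pvGroup pairs).keys.map (fun k => (k, (pairs.filter (fun p => p.1 == k)).map (fun p => p.2))) := by
    apply List.map_congr_left; intro k _; rw [pvGroup_getD]
  rw [this, pvGroup_keys]
  exact sorted_map_fst _ (PySem.Set.nodup_ofList _) _

-- A's filtering/grouping loop over the raw IOC dicts, re-read as pvGroup of the filtered pair list
lemma group_fold_eq_pvGroup (l : List (List (String × String)))
    (d : PySem.Dict String (List String)) :
    l.foldl (fun d ioc =>
        if ¬ (PySem.Dict.mk ioc).getD "ioc_value" "" = "" then
          d.modify ((PySem.Dict.mk ioc).getD "ioc_type" "unknown") []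
            (fun vs => vs ++ [(PySem.Dict.mk ioc).getD "ioc_value" ""])
        else d) d
      = ((l.map (fun ioc =>
            ((PySem.Dict.mk ioc).getD "ioc_type" "unknown",
             (PySem.Dict.mk ioc).getD "ioc_value" ""))).filter (fun p => p.2 != "")).foldl
          (fun d p => d.modify p.1 [] (fun vs => vs ++ [p.2])) d := by
  induction l generalizing d with
  | nil => rfl
  | cons ioc rest ih =>
    by_cases hv : (PySem.Dict.mk ioc).getD "ioc_value" "" = ""
    · simpa [hv] using ih d
    · simpa [hv] using ih (d.modify ((PySem.Dict.mk ioc).getD "ioc_type" "unknown") []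
        (fun vs => vs ++ [(PySem.Dict.mk ioc).getD "ioc_value" ""]))

-- ===== VERDICT (by name: the statement is the Claim_ definition above) =====
theorem create_narrative_text_spec : Claim_equal_create_narrative_text := by
  intro iocs_list source_context _
  unfold Spec_create_narrative_text create_narrative_text create_narrative_text_alt
  by_cases hi : iocs_list = []
  · simp [hi]
  · simp only [hi, bne_iff_ne, ne_eq, not_false_eq_true, if_true]
    congr 1
    rw [group_fold_eq_pvGroup]
    rw [show ∀ pairs : List (String × String),
          pairs.foldl (fun d p => d.modify p.1 [] (fun vs => vs ++ [p.2])) PySem.Dict.empty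
            = pvGroup pairs from fun _ => rfl]
    rw [items_sorted_eq]
    rw [PySem.List.foldl_congr_mem _ _
          (fun lines p => lines ++ ((PySem.Str.upper p.1 ++ ":") :: p.2 ++ [""])) _
          (by intro acc p _; simp)]
    rw [PySem.List.foldl_append_eq_flatMap, List.flatMap_map]
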